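-- pv_equiv track=rewrite | github.com/ArsenGad007/TextFilterMenu | functions.py | camel_filter
-- ===== SOURCE A (Python) =====
-- def camel_filter(text):
--     result = ""
--     is_next_upper = False
--     for i in range(len(text)):
--         if text[i] == " ":
--             is_next_upper = True
--         elif is_next_upper:
--             result += text[i].upper()
--             is_next_upper = False
--         else:
--             result += text[i]
--     return result
-- ===== SOURCE B (Python) =====
-- def camel_filter(text):
--     parts = text.split(" ")
--     result = parts[0]
--     for seg in parts[1:]:
--         if seg:
--             result += seg[0].upper() + seg[1:]
--     return result
-- ===== Notes on version B (the rewrite author's own statement) =====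
-- stated objective: simpler
-- what changed: Replaced the per-character state-machine (is_next_upper flag, one string concatenation per character) with a tokenize-then-transform pass: split on the literal single space and append each later non-empty segment whole with its first character uppercased.
import Mathlib
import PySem

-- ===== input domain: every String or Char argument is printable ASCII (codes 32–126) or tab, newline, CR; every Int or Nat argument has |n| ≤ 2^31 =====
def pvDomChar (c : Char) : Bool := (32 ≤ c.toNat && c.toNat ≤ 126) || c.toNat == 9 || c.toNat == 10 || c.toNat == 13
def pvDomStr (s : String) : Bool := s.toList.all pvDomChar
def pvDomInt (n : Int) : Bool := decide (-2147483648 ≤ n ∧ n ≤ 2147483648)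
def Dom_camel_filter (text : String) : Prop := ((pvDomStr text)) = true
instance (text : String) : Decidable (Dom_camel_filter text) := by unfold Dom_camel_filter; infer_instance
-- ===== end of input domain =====

-- B replaces A's per-character flag state machine by split-on-space then capitalize each later
-- non-empty segment's first character (objective: simpler). Return values only; no mutation.

-- ===== PORT A =====
-- A: scan characters left to right with a pending-uppercase flag.
def camel_filter (text : String) : String :=
  let st := text.toList.foldl
    (fun (acc : List Char × Bool) c =>
      if c = ' ' then (acc.1, true)
      else if acc.2 then (acc.1 ++ [PySem.Chars.upperChar c], false)
      else (acc.1 ++ [c], false))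
    ([], false)
  String.ofList st.1

-- ===== PORT B =====
-- B: text.split(" ") ported as List.splitOn ' ' (same semantics: keeps empty segments);
-- first segment kept, each later non-empty segment appended with first char uppercased.
def camel_filter_alt (text : String) : String :=
  match text.toList.splitOn ' ' with
  | [] => String.ofList []
  | first :: rest =>
    String.ofList (rest.foldl
      (fun r seg =>
        match seg with
        | [] => r
        | c :: t => r ++ (PySem.Chars.upperChar c :: t))
      first)

-- ===== PRECONDITION & SPEC =====
def Spec_camel_filter (text : String) (out : String) : Prop := out = camel_filter_alt text
instance (text : String) (out : String) : Decidable (Spec_camel_filter text out) := by unfold Spec_camel_filter; infer_instance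

-- ===== CLAIM (what is proved, stated in full; the proofs are below) =====
def Claim_equal_camel_filter : Prop := ∀ (text : String), Dom_camel_filter text → Spec_camel_filter text (camel_filter text)

-- ===== LEMMAS AND PROOFS =====

-- characterisation of A's scan as a recursion on the character list
def pvG (b : Bool) : List Char → List Char
  | [] => []
  | c :: t =>
    if c = ' ' then pvG true t
    else if b then PySem.Chars.upperChar c :: pvG false t
    else c :: pvG false t

-- B's loop body applied to a list of segments starting from the empty accumulator
def pvP : List (List Char) → List Char
  | [] => []
  | [] :: ss => pvP ss
  | (c :: t) :: ss => (PySem.Chars.upperChar c :: t) ++ pvP ss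

theorem pvA_fold (l : List Char) : ∀ (r : List Char) (b : Bool),
    (l.foldl
      (fun (acc : List Char × Bool) c =>
        if c = ' ' then (acc.1, true)
        else if acc.2 then (acc.1 ++ [PySem.Chars.upperChar c], false)
        else (acc.1 ++ [c], false))
      (r, b)).1 = r ++ pvG b l := by
  induction l with
  | nil => intro r b; simp [pvG]
  | cons c t ih =>
    intro r b
    by_cases hc : c = ' '
    · simp [pvG, hc, ih]
    · cases b <;> simp [pvG, hc, ih]

theorem pvB_fold (ss : List (List Char)) : ∀ (r : List Char),
    (ss.foldl
      (fun r seg =>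
        match seg with
        | [] => r
        | c :: t => r ++ (PySem.Chars.upperChar c :: t))
      r) = r ++ pvP ss := by
  induction ss with
  | nil => intro r; simp [pvP]
  | cons s ss ih =>
    intro r
    cases s with
    | nil => simp [pvP, ih]
    | cons c t => simp [pvP, ih]

theorem pvMain (l : List Char) :
    pvG true l = pvP (l.splitOn ' ') ∧
    pvG false l = (match l.splitOn ' ' with
                   | [] => []
                   | first :: rest => first ++ pvP rest) := by
  induction l with
  | nil => simp [pvG, List.splitOn, List.splitOnP_nil, pvP]
  | cons c t ih =>
    have hne : t.splitOn ' ' ≠ [] := List.splitOnP_ne_nil _ _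
    obtain ⟨f, r, hfr⟩ : ∃ f r, t.splitOn ' ' = f :: r := by
      cases h : t.splitOn ' ' with
      | nil => exact absurd h hne
      | cons f r => exact ⟨f, r, rfl⟩
    by_cases hc : c = ' '
    · have hsplit : (c :: t).splitOn ' ' = [] :: t.splitOn ' ' := by
        simp [List.splitOn, List.splitOnP_cons, hc]
      constructor
      · rw [hsplit, pvG]; simp [hc]
        rw [ih.1, hfr]
        simp [pvP]
      · rw [hsplit, pvG]; simp [hc]
        rw [ih.1, hfr]
    · have hsplit : (c :: t).splitOn ' ' = (c :: f) :: r := by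
        have : t.splitOn ' ' = f :: r := hfr
        simp [List.splitOn, List.splitOnP_cons, hc] at this ⊢
        simp [this]
      constructor
      · rw [hsplit, pvG]; simp [hc]
        have := ih.2; rw [hfr] at this
        simp [pvP, this]
      · rw [hsplit, pvG]; simp [hc]
        have := ih.2; rw [hfr] at this
        simp [this]

-- ===== VERDICT (by name: the statement is the Claim_ definition above) =====
theorem camel_filter_spec : Claim_equal_camel_filter := by
  intro text _
  unfold Spec_camel_filter camel_filter camel_filter_alt
  have hA := pvA_fold text.toList [] false
  have hM := (pvMain text.toList).2
  cases h : text.toList.splitOn ' ' with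
  | nil => exact absurd h (List.splitOnP_ne_nil _ _)
  | cons first rest =>
    rw [h] at hM
    simp only []
    rw [pvB_fold, hA, hM]
    simp
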